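-- pv_equiv track=rewrite | github.com/engcompprojecthub/projects | stringTree.py | stringTree
-- ===== SOURCE A (Python) =====
-- def stringTree(n):
--     if (n <= 0):
--         return [];
--     espaco = n - 1
--     arvore = []
--     for i in range(n):
--         linha = ""
--         if (espaco > 0):
--             for j in range(espaco):
--                 linha += " "
--         for j in range(n-espaco):
--             linha += "#"
--         espaco -= 1
--         arvore.append(linha)
--     return arvore
-- ===== SOURCE B (Python) =====
-- def stringTree(n):
--     if n <= 0:
--         return []
--     prev = " " * (n - 1) + "#"
--     arvore = [prev]
--     for _ in range(n - 1):
--         prev = prev[1:] + "#"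
--         arvore.append(prev)
--     return arvore
-- ===== Notes on version B (the rewrite author's own statement) =====
-- stated objective: faster
-- what changed: B derives each row from the previous one (drop a leading space, append a hash) instead of A's nested inner loops rebuilding every row one character at a time with += concatenation.
import Mathlib
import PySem

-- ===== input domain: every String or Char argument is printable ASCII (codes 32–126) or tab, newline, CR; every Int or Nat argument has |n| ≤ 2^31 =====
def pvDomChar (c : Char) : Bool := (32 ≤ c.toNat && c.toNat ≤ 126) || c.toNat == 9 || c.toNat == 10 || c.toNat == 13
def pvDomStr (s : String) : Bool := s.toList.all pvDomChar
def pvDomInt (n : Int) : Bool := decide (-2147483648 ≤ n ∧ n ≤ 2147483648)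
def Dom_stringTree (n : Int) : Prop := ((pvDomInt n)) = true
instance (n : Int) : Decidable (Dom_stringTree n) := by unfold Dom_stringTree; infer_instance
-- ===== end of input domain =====

-- B builds each row from the previous one (drop one leading space, append one '#')
-- instead of A's nested loops rebuilding every row from the counters; same values, alternative decomposition.
-- Python strings are carried as their code-point lists (List Char) and wrapped with String.ofList on append, exact for this task.

-- ===== PORT A =====
-- body of A's 'for i in range(n)' loop; state = (espaco, arvore)
def pvBodyA (n : Int) (st : Int × List String) (_i : Int) : Int × List String :=
  let espaco := st.1
  let linha : List Char := []
  let linha := if espaco > 0 then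
      (PySem.List.pyRange 0 espaco 1).foldl (fun l _j => l ++ [' ']) linha
    else linha
  let linha := (PySem.List.pyRange 0 (n - espaco) 1).foldl (fun l _j => l ++ ['#']) linha
  (espaco - 1, st.2 ++ [String.ofList linha])

def stringTree (n : Int) : List String :=
  if n ≤ 0 then []
  else ((PySem.List.pyRange 0 n 1).foldl (pvBodyA n) (n - 1, [])).2

-- ===== PORT B =====
-- body of B's 'for _ in range(n-1)' loop; state = (prev, arvore)
def pvBodyB (st : List Char × List String) (_i : Int) : List Char × List String :=
  let p := PySem.List.slice st.1 (some 1) none ++ ['#']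
  (p, st.2 ++ [String.ofList p])

def stringTree_alt (n : Int) : List String :=
  if n ≤ 0 then []
  else
    let prev : List Char := PySem.List.pyRepeat [' '] (n - 1) ++ ['#']
    ((PySem.List.pyRange 0 (n - 1) 1).foldl pvBodyB (prev, [String.ofList prev])).2

-- ===== PRECONDITION & SPEC =====
def Spec_stringTree (n : Int) (out : List String) : Prop := out = stringTree_alt n
instance (n : Int) (out : List String) : Decidable (Spec_stringTree n out) := by unfold Spec_stringTree; infer_instance

-- ===== CLAIM (what is proved, stated in full; the proofs are below) =====
def Claim_equal_stringTree : Prop := ∀ (n : Int), Dom_stringTree n → Spec_stringTree n (stringTree n)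

-- ===== LEMMAS AND PROOFS =====

-- the i-th row of the triangle of height m+1, as a char list
def pvRow (m i : Nat) : List Char := List.replicate (m - i) ' ' ++ List.replicate (i + 1) '#'

-- appending a constant char once per list element = appending a replicate
theorem pv_foldl_append_const {α : Type} (c : Char) :
    ∀ (xs : List α) (init : List Char),
      xs.foldl (fun l _ => l ++ [c]) init = init ++ List.replicate xs.length c := by
  intro xs
  induction xs with
  | nil => intro init; simp
  | cons x t ih =>
    intro init
    simp only [List.foldl_cons, ih, List.length_cons]
    simp [List.replicate_succ, List.append_assoc]

theorem pvRow_succ (m i : Nat) (h : i < m) :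
    (pvRow m i).tail ++ ['#'] = pvRow m (i + 1) := by
  unfold pvRow
  have h1 : m - i = (m - (i + 1)) + 1 := by omega
  rw [h1, List.replicate_succ]
  simp only [List.cons_append, List.tail_cons, List.append_assoc]
  rw [← List.replicate_succ']

-- one step of A's body at espaco = m - i ≥ 0 produces exactly row i
theorem pvBodyA_step (m i : Nat) (acc : List String) (hi : i ≤ m) (x : Int) :
    pvBodyA ((m : Int) + 1) ((m : Int) - i, acc) x
      = ((m : Int) - (i + 1 : Nat), acc ++ [String.ofList (pvRow m i)]) := by
  unfold pvBodyA pvRow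
  have hsp : ((PySem.List.pyRange 0 ((m : Int) - i) 1).foldl (fun l _j => l ++ [' ']) ([] : List Char))
      = List.replicate (m - i) ' ' := by
    rw [pv_foldl_append_const]
    rw [PySem.List.length_pyRange_one]
    simp only [List.nil_append]
    have ht : ((m : Int) - i - 0).toNat = m - i := by omega
    rw [ht]
  have hhs : ∀ l : List Char, ((PySem.List.pyRange 0 ((m : Int) + 1 - ((m : Int) - i)) 1).foldl (fun l _j => l ++ ['#']) l)
      = l ++ List.replicate (i + 1) '#' := by
    intro l
    rw [pv_foldl_append_const, PySem.List.length_pyRange_one]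
    have ht : ((m : Int) + 1 - ((m : Int) - i) - 0).toNat = i + 1 := by omega
    rw [ht]
  by_cases hp : ((m : Int) - i) > 0
  · simp only [hp, if_pos, hsp, hhs, Prod.mk.injEq]
    exact ⟨by push_cast; omega, trivial⟩
  · -- espaco ≤ 0: only on the last iteration (i = m); the inner space loop is skipped and replicate (m-m) = []
    have him : i = m := by omega
    subst him
    simp only [if_neg hp, Prod.mk.injEq, Nat.sub_self, List.replicate_zero, List.nil_append, hhs]
    exact ⟨by push_cast; omega, trivial⟩

-- a fold whose body ignores the list elements depends only on the list's length
theorem pv_foldl_ignore {σ α : Type} (f : σ → α → σ) (hfg : ∀ s x y, f s x = f s y) :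
    ∀ (xs ys : List α), xs.length = ys.length → ∀ init, xs.foldl f init = ys.foldl f init := by
  intro xs
  induction xs with
  | nil => intro ys h init; cases ys with
    | nil => rfl
    | cons y t => simp at h
  | cons x t ih =>
    intro ys h init
    cases ys with
    | nil => simp at h
    | cons y u =>
      simp only [List.foldl_cons]
      rw [hfg init x y]
      exact ih u (by simpa using h) _

-- A's loop invariant
theorem pvA_loop (m : Nat) :
    ∀ (k i : Nat) (acc : List String), i + k = m + 1 →
      ((PySem.List.pyRange 0 (k : Int) 1).foldl (pvBodyA ((m : Int) + 1)) ((m : Int) - i, acc)).2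
      = acc ++ (List.range k).map (fun t => String.ofList (pvRow m (i + t))) := by
  intro k
  induction k with
  | zero => intro i acc _; simp [PySem.List.pyRange_one_eq_nil]
  | succ k ih =>
    intro i acc h
    have hc : ((k + 1 : Nat) : Int) = (k : Int) + 1 := by push_cast; omega
    rw [hc, PySem.List.pyRange_one_cons (by omega : (0:Int) < (k:Int) + 1)]
    rw [List.foldl_cons, pvBodyA_step m i acc (by omega) 0]
    rw [pv_foldl_ignore (pvBodyA ((m : Int) + 1)) (fun s x y => rfl)
          (PySem.List.pyRange (0 + 1) ((k : Int) + 1) 1) (PySem.List.pyRange 0 (k : Int) 1)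
          (by rw [PySem.List.length_pyRange_one, PySem.List.length_pyRange_one]; omega)]
    rw [ih (i + 1) _ (by omega)]
    simp only [List.range_succ_eq_map, List.map_cons, List.map_map,
      Nat.add_zero, List.append_assoc, List.singleton_append]
    congr 2
    apply List.map_congr_left
    intro t _
    congr 2
    omega

-- one step of B's body turns row i into row (i+1)
theorem pvBodyB_step (m i : Nat) (acc : List String) (hi : i < m) (x : Int) :
    pvBodyB (pvRow m i, acc) x = (pvRow m (i + 1), acc ++ [String.ofList (pvRow m (i + 1))]) := by
  unfold pvBodyB
  rw [PySem.List.slice_from_one, pvRow_succ m i hi]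

-- B's loop invariant
theorem pvB_loop (m : Nat) :
    ∀ (k i : Nat) (acc : List String), i + k ≤ m →
      ((PySem.List.pyRange 0 (k : Int) 1).foldl pvBodyB (pvRow m i, acc)).2
      = acc ++ (List.range k).map (fun t => String.ofList (pvRow m (i + 1 + t))) := by
  intro k
  induction k with
  | zero => intro i acc _; simp [PySem.List.pyRange_one_eq_nil]
  | succ k ih =>
    intro i acc h
    have hc : ((k + 1 : Nat) : Int) = (k : Int) + 1 := by push_cast; omega
    rw [hc, PySem.List.pyRange_one_cons (by omega : (0:Int) < (k:Int) + 1)]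
    rw [List.foldl_cons, pvBodyB_step m i acc (by omega) 0]
    rw [pv_foldl_ignore pvBodyB (fun s x y => rfl)
          (PySem.List.pyRange (0 + 1) ((k : Int) + 1) 1) (PySem.List.pyRange 0 (k : Int) 1)
          (by rw [PySem.List.length_pyRange_one, PySem.List.length_pyRange_one]; omega)]
    rw [ih (i + 1) _ (by omega)]
    simp only [List.range_succ_eq_map, List.map_cons, List.map_map,
      Nat.add_zero, List.append_assoc, List.singleton_append]
    congr 2
    apply List.map_congr_left
    intro t _
    congr 2
    omega

-- ===== VERDICT (by name: the statement is the Claim_ definition above) =====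
theorem stringTree_spec : Claim_equal_stringTree := by
  intro n _
  unfold Spec_stringTree stringTree stringTree_alt
  by_cases hn : n ≤ 0
  · simp [hn]
  · obtain ⟨m, hm⟩ : ∃ m : Nat, n = (m : Int) + 1 := ⟨(n - 1).toNat, by omega⟩
    subst hm
    have e1 : (m : Int) + 1 - 1 = (m : Int) := by omega
    simp only [if_neg hn, e1, PySem.List.pyRepeat_singleton]
    have hprev : List.replicate ((m : Int)).toNat ' ' ++ ['#'] = pvRow m 0 := by
      simp [pvRow]
    rw [hprev]
    have hA := pvA_loop m (m + 1) 0 [] (by omega)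
    have hB := pvB_loop m m 0 [String.ofList (pvRow m 0)] (by omega)
    simp only [Nat.cast_zero, sub_zero, Nat.cast_add, Nat.cast_one, List.nil_append] at hA hB
    rw [hA, hB]
    simp only [List.range_succ_eq_map, List.map_cons, List.map_map, Nat.add_zero,
      List.singleton_append]
    refine congrArg (List.cons _) ?_
    apply List.map_congr_left
    intro t _
    simp only [Function.comp_apply]
    have ht : 0 + Nat.succ t = 0 + 1 + t := by omega
    rw [ht]
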